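-- pv_equiv track=rewrite | github.com/SeongUk18/codetree-TILs | 250415/최대 H 점수 2/maximum-h-score-2.py | solve
-- ===== SOURCE A (Python) =====
-- def is_possible(H, nums, L):
--     cnt = 0
--     for num in nums:
--         if num >= H:
--             cnt += 1
--     if cnt >= H:
--         return True
--
--     # 나머지는 H - num == 1인 것만 골라야 함 (1씩만 증가 가능)
--     needed = 0
--     for num in nums:
--         if num < H and num + 1 >= H:
--             needed += 1
--     return cnt + min(needed, L) >= H
--
-- def solve(n, l, nums):
--     left, right = 0, 101
--     result = 0
--     while left <= right:
--         mid = (left + right) // 2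
--         if is_possible(mid, nums, l):
--             result = mid
--             left = mid + 1
--         else:
--             right = mid - 1
--     return result
-- ===== SOURCE B (Python) =====
-- def is_possible(H, nums, L):
--     cnt = 0
--     for num in nums:
--         if num >= H:
--             cnt += 1
--     if cnt >= H:
--         return True
--     needed = 0
--     for num in nums:
--         if num < H and num + 1 >= H:
--             needed += 1
--     return cnt + min(needed, L) >= H
--
-- def solve(n, l, nums):
--     # Feasibility is monotone decreasing in H, so the answer is the first
--     # feasible H scanning down from 101 (H = 0 is always feasible).
--     for H in range(101, -1, -1):
--         if is_possible(H, nums, l):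
--             return H
--     return 0
-- ===== Notes on version B (the rewrite author's own statement) =====
-- stated objective: simpler
-- what changed: Replaced the binary search over [0,101] with a direct downward linear scan returning the first feasible H (feasibility is monotone decreasing in H).
import Mathlib
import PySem

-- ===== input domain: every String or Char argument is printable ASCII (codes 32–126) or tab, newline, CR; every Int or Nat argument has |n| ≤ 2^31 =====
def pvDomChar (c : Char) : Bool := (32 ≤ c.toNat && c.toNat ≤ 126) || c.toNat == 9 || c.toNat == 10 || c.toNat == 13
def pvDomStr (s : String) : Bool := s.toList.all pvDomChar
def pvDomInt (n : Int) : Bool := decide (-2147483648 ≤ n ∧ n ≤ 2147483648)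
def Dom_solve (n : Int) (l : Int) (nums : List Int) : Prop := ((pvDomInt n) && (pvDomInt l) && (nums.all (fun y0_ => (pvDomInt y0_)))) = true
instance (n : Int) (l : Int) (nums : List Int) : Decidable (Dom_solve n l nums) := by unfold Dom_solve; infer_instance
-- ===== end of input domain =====

-- B replaces A's binary search over [0,101] with a downward linear scan returning the
-- first feasible H (feasibility is monotone decreasing in H); objective: simpler.

-- ===== PORT A =====
-- port of is_possible (shared helper, identical in Source A and Source B)
def is_possible (H : Int) (nums : List Int) (L : Int) : Bool :=
  let cnt := nums.foldl (fun cnt num => if num ≥ H then cnt + 1 else cnt) (0 : Int)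
  if cnt ≥ H then true
  else
    let needed := nums.foldl (fun needed num => if num < H ∧ num + 1 ≥ H then needed + 1 else needed) (0 : Int)
    decide (cnt + min needed L ≥ H)

-- the while-loop of A's solve, recursion on the shrinking bracket
def bsLoop (nums : List Int) (l : Int) (left right result : Int) : Int :=
  if h : left ≤ right then
    let mid := PySem.Int.floordiv (left + right) 2
    if is_possible mid nums l then bsLoop nums l (mid + 1) right mid
    else bsLoop nums l left (mid - 1) result
  else result
termination_by (right + 1 - left).toNat
decreasing_by
  · have := PySem.Int.floordiv_two_mid_bounds h
    omega
  · have := PySem.Int.floordiv_two_mid_bounds h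
    omega

def solve (n : Int) (l : Int) (nums : List Int) : Int := bsLoop nums l 0 101 0

-- ===== PORT B =====
-- Source B's 'for H in range(101, -1, -1)' loop, H counted down; final 'return 0' is the base case
def scanDown (nums : List Int) (l : Int) : Nat → Int
  | 0 => if is_possible 0 nums l then 0 else 0
  | h + 1 => if is_possible ((h : Int) + 1) nums l then (h : Int) + 1 else scanDown nums l h

def solve_alt (n : Int) (l : Int) (nums : List Int) : Int := scanDown nums l 101

-- ===== PRECONDITION & SPEC =====
def Spec_solve (n : Int) (l : Int) (nums : List Int) (out : Int) : Prop := out = solve_alt n l nums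
instance (n : Int) (l : Int) (nums : List Int) (out : Int) : Decidable (Spec_solve n l nums out) := by unfold Spec_solve; infer_instance

-- ===== CLAIM (what is proved, stated in full; the proofs are below) =====
def Claim_equal_solve : Prop := ∀ (n : Int) (l : Int) (nums : List Int), Dom_solve n l nums → Spec_solve n l nums (solve n l nums)

-- ===== LEMMAS AND PROOFS =====

-- counting folds are countP
theorem foldl_count (p : Int → Prop) [DecidablePred p] (l : List Int) (i : Int) :
    l.foldl (fun c num => if p num then c + 1 else c) i = i + (l.countP (fun num => decide (p num)) : Int) := by
  induction l generalizing i with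
  | nil => simp
  | cons x xs ih =>
    simp only [List.foldl_cons, List.countP_cons, ih]
    by_cases h : p x <;> simp [h] <;> push_cast <;> ring

-- abbreviations for the two counts
def cntC (H : Int) (nums : List Int) : Int := (nums.countP (fun num => decide (num ≥ H)) : Int)
def cntN (H : Int) (nums : List Int) : Int := (nums.countP (fun num => decide (num < H ∧ num + 1 ≥ H)) : Int)

theorem is_possible_iff (H : Int) (nums : List Int) (L : Int) :
    is_possible H nums L = true ↔ (cntC H nums ≥ H ∨ cntC H nums + min (cntN H nums) L ≥ H) := by
  unfold is_possible cntC cntN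
  rw [foldl_count (fun num => num ≥ H), foldl_count (fun num => num < H ∧ num + 1 ≥ H)]
  by_cases h : (0 : Int) + (nums.countP (fun num => decide (num ≥ H)) : Int) ≥ H <;>
    simp [h] <;> omega

theorem cnt_split (H : Int) (nums : List Int) :
    cntC (H - 1) nums = cntC H nums + cntN H nums := by
  unfold cntC cntN
  induction nums with
  | nil => simp
  | cons x xs ih =>
    simp only [List.countP_cons] at ih ⊢
    by_cases h1 : H - 1 ≤ x <;> by_cases h2 : H ≤ x <;> by_cases h3 : x < H <;> by_cases h4 : H ≤ x + 1 <;>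
      simp [h1, h2, h3, h4] at ih ⊢ <;> omega

theorem cntN_nonneg (H : Int) (nums : List Int) : 0 ≤ cntN H nums := by
  unfold cntN; positivity

-- one monotone step downwards
theorem possible_step (H : Int) (nums : List Int) (L : Int)
    (h : is_possible H nums L = true) : is_possible (H - 1) nums L = true := by
  rw [is_possible_iff] at *
  have hs := cnt_split H nums
  have hn := cntN_nonneg H nums
  omega

-- full monotonicity: feasible at b, a ≤ b ⇒ feasible at a
theorem possible_mono (nums : List Int) (L : Int) (a b : Int) (hab : a ≤ b)
    (h : is_possible b nums L = true) : is_possible a nums L = true := by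
  have key : ∀ k : Nat, ∀ b : Int, is_possible b nums L = true → is_possible (b - k) nums L = true := by
    intro k
    induction k with
    | zero => intro b hb; simpa using hb
    | succ m ih =>
      intro b hb
      have := possible_step (b - m) nums L (ih b hb)
      have he : b - (↑(m + 1) : Int) = b - m - 1 := by push_cast; ring
      rwa [he]
  have hk : a = b - ((b - a).toNat : Int) := by omega
  rw [hk]; exact key _ _ h

theorem possible_zero (nums : List Int) (L : Int) : is_possible 0 nums L = true := by
  rw [is_possible_iff]
  unfold cntC
  left; positivity

-- scanDown k is the greatest feasible H in [0, k]
theorem scanDown_nonneg (nums : List Int) (l : Int) (k : Nat) : 0 ≤ scanDown nums l k := by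
  induction k with
  | zero => simp [scanDown]
  | succ m ih => simp only [scanDown]; split <;> omega

theorem scanDown_le (nums : List Int) (l : Int) (k : Nat) : scanDown nums l k ≤ k := by
  induction k with
  | zero => simp [scanDown]
  | succ m ih => simp only [scanDown]; split <;> push_cast <;> omega

theorem scanDown_possible (nums : List Int) (l : Int) (k : Nat) :
    is_possible (scanDown nums l k) nums l = true := by
  induction k with
  | zero => simp [scanDown, possible_zero]
  | succ m ih =>
    simp only [scanDown]
    split
    · assumption
    · exact ih

theorem scanDown_max (nums : List Int) (l : Int) (k : Nat) :
    ∀ h : Int, scanDown nums l k < h → h ≤ k → is_possible h nums l = false := by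
  induction k with
  | zero =>
    intro h h1 h2
    simp only [scanDown] at h1; split at h1 <;> omega
  | succ m ih =>
    intro h h1 h2
    simp only [scanDown] at h1
    split at h1
    · push_cast at h1 h2; omega
    · rcases lt_or_ge (m : Int) h with hm | hm
      · have : h = (m : Int) + 1 := by push_cast at h2; omega
        subst this
        simpa using ‹¬ is_possible ((m : Int) + 1) nums l = true›
      · exact ih h h1 hm

-- binary-search invariant: with M the scan answer, the loop returns M
theorem bsLoop_eq (nums : List Int) (l : Int) :
    ∀ (left right result : Int),
      0 ≤ left → right ≤ 101 → left ≤ result + 1 → result ≤ scanDown nums l 101 →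
      left ≤ scanDown nums l 101 + 1 →
      (scanDown nums l 101 ≤ right ∨ (result = scanDown nums l 101 ∧ left = scanDown nums l 101 + 1)) →
      bsLoop nums l left right result = scanDown nums l 101 := by
  intro left right result
  generalize hM : scanDown nums l 101 = M
  intro h0 h101 hlr hrm hlm hdisj
  have hM0 : 0 ≤ M := hM ▸ scanDown_nonneg nums l 101
  have hM101 : M ≤ 101 := by have := scanDown_le nums l 101; omega
  have hMposs : is_possible M nums l = true := by rw [← hM]; exact scanDown_possible nums l 101
  have hMmax : ∀ h : Int, M < h → h ≤ 101 → is_possible h nums l = false := by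
    rw [← hM]; exact scanDown_max nums l 101
  clear hM
  induction left, right, result using bsLoop.induct nums l with
  | case1 left right result hle mid hposs ih =>
    rw [bsLoop]
    simp only [dif_pos hle]
    have hmid := PySem.Int.floordiv_two_mid_bounds hle
    rw [if_pos hposs]
    -- mid is feasible, hence mid ≤ M
    have hmM : mid ≤ M := by
      by_contra hc
      have := hMmax mid (by omega) (by omega)
      rw [this] at hposs; exact Bool.false_ne_true hposs
    exact ih (by omega) h101 (by omega) hmM (by omega)
      (Or.inl (by rcases hdisj with h | ⟨h1, h2⟩ <;> omega))
  | case2 left right result hle mid hposs ih =>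
    rw [bsLoop]
    simp only [dif_pos hle]
    rw [if_neg hposs]
    have hmid := PySem.Int.floordiv_two_mid_bounds hle
    -- mid is infeasible, hence M < mid (by monotonicity)
    have hMm : M < mid := by
      by_contra hc
      exact hposs (possible_mono nums l mid M (by omega) hMposs)
    exact ih h0 (by omega) hlr hrm hlm (Or.inl (by omega))
  | case3 left right result hle =>
    rw [bsLoop]
    simp only [dif_neg hle]
    omega

-- ===== VERDICT (by name: the statement is the Claim_ definition above) =====
theorem solve_spec : Claim_equal_solve := by
  intro n l nums _
  unfold Spec_solve solve solve_alt
  have hM0 := scanDown_nonneg nums l 101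
  have hM101 := scanDown_le nums l 101
  exact bsLoop_eq nums l 0 101 0 (by omega) (by omega) (by omega) (by omega) (by omega)
    (Or.inl (by exact_mod_cast hM101))
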